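-- pv_equiv track=rewrite | github.com/tungstenfabric/tf-charms | contrail-agent/hooks/contrail_agent_utils.py | _convert2cpuset
-- ===== SOURCE A (Python) =====
-- def _convert2cpuset(cpuset):
--     if not cpuset or not cpuset.startswith("0x"):
--         return cpuset
--     cpuset_int = int(cpuset, 16)
--     cpuset = ""
--     mask = 1
--     i = 0
--     while i < 64:
--         start = i
--         while (cpuset_int & mask != 0) and i < 64:
--             i += 1
--             mask <<= 1
--         if i == start:
--             i += 1
--             mask <<= 1
--             continue
--         if cpuset:
--             cpuset += ","
--         if i - start > 2:
--             cpuset += "{}-{}".format(start, i - 1)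
--         elif i - start > 1:
--             cpuset += "{},{}".format(start, i - 1)
--         else:
--             cpuset += "{}".format(start)
--     return cpuset
-- ===== SOURCE B (Python) =====
-- def _convert2cpuset(cpuset):
--     if not cpuset or not cpuset.startswith("0x"):
--         return cpuset
--     bits = int(cpuset, 16)
--     positions = [i for i in range(64) if bits & (1 << i)]
--     runs = []
--     for p in positions:
--         if runs and runs[-1][1] + 1 == p:
--             runs[-1] = (runs[-1][0], p)
--         else:
--             runs.append((p, p))
--     parts = []
--     for s, e in runs:
--         if e - s >= 2:
--             parts.append("{}-{}".format(s, e))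
--         elif e == s + 1:
--             parts.append("{},{}".format(s, e))
--         else:
--             parts.append("{}".format(s))
--     return ",".join(parts)
-- ===== Notes on version B (the rewrite author's own statement) =====
-- stated objective: alternative
-- what changed: Replaces A's nested while-loops with a shifting mask and in-place string concatenation by a pipeline: extract the list of set bit positions, group them into maximal consecutive runs, format each run, and join with commas.
import Mathlib
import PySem

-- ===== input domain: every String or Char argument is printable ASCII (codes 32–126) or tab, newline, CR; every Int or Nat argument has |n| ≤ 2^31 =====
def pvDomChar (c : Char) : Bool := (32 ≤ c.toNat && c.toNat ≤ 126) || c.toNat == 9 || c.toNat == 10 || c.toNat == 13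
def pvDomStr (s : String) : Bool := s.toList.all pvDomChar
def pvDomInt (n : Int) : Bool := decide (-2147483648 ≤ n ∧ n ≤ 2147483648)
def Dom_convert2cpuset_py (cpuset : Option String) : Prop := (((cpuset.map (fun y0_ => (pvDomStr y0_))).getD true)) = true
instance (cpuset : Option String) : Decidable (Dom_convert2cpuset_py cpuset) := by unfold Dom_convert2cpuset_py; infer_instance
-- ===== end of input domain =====

-- B replaces A's nested while-loops over a shifting bit mask (with in-place string
-- concatenation) by a pipeline: list of set bit positions -> maximal consecutive runs ->
-- format each run -> join with commas.  Objective: alternative decomposition, same cost.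
-- Both Pythons call int(cpuset, 16) on a string starting with "0x": that value is ≥ 0
-- (no sign can precede a matched "0x" prefix), so each port takes .toNat of the
-- PySem.Int.ofStrBase? result and runs its bit loop over Nat — exact on every admitted input.

-- ===== PORT A =====
-- inner 'while (cpuset_int & mask != 0) and i < 64' loop; returns the final (i, mask).
-- 'fuel' is a pure totality guard: i increases every step and the loop stops at i = 64,
-- so fuel = 64 at a call with i = 0 (and 64 ≥ 64 - i generally) is never exhausted early.
def pvInnerA (v : Nat) : Nat → Nat → Nat → Nat × Nat
  | 0, i, mask => (i, mask)
  | fuel + 1, i, mask =>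
      if v &&& mask ≠ 0 ∧ i < 64 then pvInnerA v fuel (i + 1) (mask <<< 1) else (i, mask)

-- outer 'while i < 64' loop of A (same fuel guard: i strictly increases each iteration)
def pvOuterA (v : Nat) : Nat → String → Nat → Nat → String
  | 0, acc, _, _ => acc
  | fuel + 1, acc, i, mask =>
    if i < 64 then
      let r := pvInnerA v 64 i mask
      if r.1 = i then
        pvOuterA v fuel acc (r.1 + 1) (r.2 <<< 1)
      else
        let acc1 := if acc ≠ "" then acc ++ "," else acc
        let acc2 :=
          if r.1 - i > 2 then
            acc1 ++ Nat.repr i ++ "-" ++ Nat.repr (r.1 - 1)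
          else if r.1 - i > 1 then
            acc1 ++ Nat.repr i ++ "," ++ Nat.repr (r.1 - 1)
          else acc1 ++ Nat.repr i
        pvOuterA v fuel acc2 r.1 r.2
    else acc

def convert2cpuset_py (cpuset : Option String) : Option String :=
  match cpuset with
  | none => none
  | some s =>
    if s = "" ∨ ¬ PySem.Str.startswith s "0x" then some s
    else
      match PySem.Int.ofStrBase? s 16 with   -- int(cpuset, 16)
      | none => none           -- int(cpuset, 16) raises ValueError (excluded by Pre_)
      | some v => some (pvOuterA v.toNat 64 "" 0 1)

-- ===== PORT B =====
def pvStepRun (rs : List (Nat × Nat)) (p : Nat) : List (Nat × Nat) :=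
  match rs with
  | (s, e) :: rest => if e + 1 = p then (s, p) :: rest else (p, p) :: (s, e) :: rest
  | [] => [(p, p)]
-- (the runs list is kept head-first, i.e. reversed: B's runs[-1] is the head)

def pvFmtRun (r : Nat × Nat) : String :=
  if r.2 - r.1 ≥ 2 then Nat.repr r.1 ++ "-" ++ Nat.repr r.2
  else if r.2 = r.1 + 1 then Nat.repr r.1 ++ "," ++ Nat.repr r.2
  else Nat.repr r.1

def convert2cpuset_py_alt (cpuset : Option String) : Option String :=
  match cpuset with
  | none => none
  | some s =>
    if s = "" ∨ ¬ PySem.Str.startswith s "0x" then some s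
    else
      match PySem.Int.ofStrBase? s 16 with   -- int(cpuset, 16)
      | none => none           -- int(cpuset, 16) raises ValueError (excluded by Pre_)
      | some v =>
        let bits := v.toNat
        let positions := (List.range 64).filter (fun i => bits &&& (1 <<< i) != 0)
        let runs := (positions.foldl pvStepRun []).reverse
        some (PySem.Str.join "," (runs.map pvFmtRun))

-- ===== PRECONDITION & SPEC =====
-- Pre_ excludes exactly the inputs on which A raises ValueError: strings that start with
-- "0x" but are not a valid base-16 literal (so int(cpuset, 16) fails); A returns on all others.
-- Pre_-only helpers: a closed-form check of Python's base-16 literal grammar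
-- (hex digits, single '_' separators also allowed right after the "0x" prefix,
--  trailing ASCII whitespace) — these are not used by either port.
def pvHexDigB (c : Char) : Bool :=
  ('0' ≤ c && c ≤ '9') || ('a' ≤ c && c ≤ 'f') || ('A' ≤ c && c ≤ 'F')

def pvHexOk : List Char → Bool
  | [] => true
  | '_' :: c :: cs => pvHexDigB c && pvHexOk cs
  | c :: cs => pvHexDigB c && pvHexOk cs

def pvIsWs (c : Char) : Bool := c == ' ' || c == '\t' || c == '\n' || c == '\r'

def pvPreOk (cpuset : Option String) : Bool :=
  match cpuset with
  | none => true
  | some s =>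
    match s.toList with
    | '0' :: 'x' :: rest =>
        let body := (rest.reverse.dropWhile pvIsWs).reverse
        !body.isEmpty && pvHexOk body
    | _ => true

def Pre_convert2cpuset_py (cpuset : Option String) : Prop := pvPreOk cpuset = true

instance (cpuset : Option String) : Decidable (Pre_convert2cpuset_py cpuset) := by
  unfold Pre_convert2cpuset_py; infer_instance

def pvWitness_convert2cpuset_py : Option String := some "0xf5"

def Spec_convert2cpuset_py (cpuset : Option String) (out : Option String) : Prop := out = convert2cpuset_py_alt cpuset
instance (cpuset : Option String) (out : Option String) : Decidable (Spec_convert2cpuset_py cpuset out) := by unfold Spec_convert2cpuset_py; infer_instance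

-- ===== CLAIM (what is proved, stated in full; the proofs are below) =====
def Claim_equal_convert2cpuset_py : Prop := ∀ (cpuset : Option String), Dom_convert2cpuset_py cpuset → Pre_convert2cpuset_py cpuset → Spec_convert2cpuset_py cpuset (convert2cpuset_py cpuset)

-- ===== LEMMAS AND PROOFS =====

-- clean form of A's inner scan: first index ≥ i (capped by the loop bound 64) whose bit is clear
def pvScanEnd (v : Nat) (i : Nat) : Nat :=
  if i < 64 ∧ v.testBit i then pvScanEnd v (i + 1) else i
termination_by 64 - i

theorem pvScanEnd_ge_aux (v : Nat) : ∀ n i, 64 - i ≤ n → i ≤ pvScanEnd v i := by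
  intro n
  induction n with
  | zero => intro i hi; rw [pvScanEnd, if_neg (by omega)]
  | succ n ih =>
    intro i hi
    by_cases h : i < 64 ∧ v.testBit i
    · rw [pvScanEnd, if_pos h]
      have := ih (i + 1) (by omega)
      omega
    · rw [pvScanEnd, if_neg h]

theorem pvScanEnd_ge (v i : Nat) : i ≤ pvScanEnd v i :=
  pvScanEnd_ge_aux v (64 - i) i le_rfl

theorem pvScanEnd_succ (v i : Nat) (h : i < 64 ∧ v.testBit i) :
    pvScanEnd v i = pvScanEnd v (i + 1) := by rw [pvScanEnd, if_pos h]

theorem pvScanEnd_stop (v i : Nat) (h : ¬ (i < 64 ∧ v.testBit i)) :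
    pvScanEnd v i = i := by rw [pvScanEnd, if_neg h]

theorem pvAndPow (v i : Nat) : (v &&& 2 ^ i ≠ 0) ↔ v.testBit i = true := by
  rw [Nat.and_two_pow]
  rcases h : v.testBit i <;> simp

theorem pvPowShift (i : Nat) : (2 ^ i) <<< 1 = 2 ^ (i + 1) := by
  rw [Nat.shiftLeft_eq, pow_one, ← pow_succ]

theorem pvInnerA_eq (v : Nat) : ∀ n i, 64 - i ≤ n →
    pvInnerA v n i (2 ^ i) = (pvScanEnd v i, 2 ^ pvScanEnd v i) := by
  intro n
  induction n with
  | zero =>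
    intro i hi
    rw [pvInnerA, pvScanEnd_stop v i (by omega)]
  | succ n ih =>
    intro i hi
    by_cases h : v &&& 2 ^ i ≠ 0 ∧ i < 64
    · rw [pvInnerA, if_pos h, pvPowShift, ih (i + 1) (by omega),
        pvScanEnd_succ v i ⟨h.2, (pvAndPow v i).mp h.1⟩]
    · rw [pvInnerA, if_neg h]
      rw [pvScanEnd_stop v i (by intro hc; exact h ⟨(pvAndPow v i).mpr hc.2, hc.1⟩)]

-- clean form of A's emitted runs from position i on
def pvRunsFrom (v : Nat) (i : Nat) : List (Nat × Nat) :=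
  if h : i < 64 then
    if hb : v.testBit i then
      (i, pvScanEnd v (i + 1) - 1) :: pvRunsFrom v (pvScanEnd v (i + 1))
    else pvRunsFrom v (i + 1)
  else []
termination_by 64 - i
decreasing_by
  · have := pvScanEnd_ge v (i + 1); omega
  · omega

def pvStepStr (acc : String) (r : Nat × Nat) : String :=
  (if acc ≠ "" then acc ++ "," else acc) ++ pvFmtRun r

theorem pvFmt_run (s j : Nat) (hj : s + 1 ≤ j) :
    pvFmtRun (s, j - 1) =
      (if j - s > 2 then Nat.repr s ++ "-" ++ Nat.repr (j - 1)
       else if j - s > 1 then Nat.repr s ++ "," ++ Nat.repr (j - 1)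
       else Nat.repr s) := by
  unfold pvFmtRun
  dsimp only
  split_ifs <;> first | rfl | omega

theorem pvOuterA_eq (v : Nat) : ∀ n i acc, 64 - i ≤ n →
    pvOuterA v n acc i (2 ^ i) = List.foldl pvStepStr acc (pvRunsFrom v i) := by
  intro n
  induction n with
  | zero =>
    intro i acc hi
    rw [pvOuterA, pvRunsFrom, dif_neg (by omega : ¬ i < 64)]
    rfl
  | succ n ih =>
    intro i acc hi
    by_cases h64 : i < 64
    · rw [pvOuterA, if_pos h64]
      have hin : pvInnerA v 64 i (2 ^ i) = (pvScanEnd v i, 2 ^ pvScanEnd v i) :=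
        pvInnerA_eq v 64 i (by omega)
      dsimp only
      rw [hin]
      by_cases hb : v.testBit i
      · -- bit set: a run is emitted
        have hsucc : pvScanEnd v i = pvScanEnd v (i + 1) := pvScanEnd_succ v i ⟨h64, hb⟩
        have hge : i + 1 ≤ pvScanEnd v (i + 1) := pvScanEnd_ge v (i + 1)
        rw [if_neg (by omega : ¬ pvScanEnd v i = i)]
        rw [pvRunsFrom, dif_pos h64, dif_pos hb, List.foldl_cons, hsucc,
          ih (pvScanEnd v (i + 1)) _ (by omega)]
        congr 1
        rw [pvStepStr, pvFmt_run i (pvScanEnd v (i + 1)) hge]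
        split_ifs <;> simp [String.append_assoc]
      · -- bit clear: skip
        have hstop : pvScanEnd v i = i := pvScanEnd_stop v i (by tauto)
        rw [if_pos hstop]
        rw [pvRunsFrom, dif_pos h64, dif_neg hb]
        rw [hstop, pvPowShift]
        exact ih (i + 1) acc (by omega)
    · rw [pvOuterA, if_neg h64, pvRunsFrom, dif_neg h64]
      rfl

-- ----- B side -----
def pvPositionsFrom (v : Nat) (i : Nat) : List Nat :=
  (List.range' i (64 - i)).filter (fun k => v.testBit k)

theorem pvPositionsFrom_stop (v i : Nat) (h : 64 ≤ i) : pvPositionsFrom v i = [] := by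
  unfold pvPositionsFrom
  rw [(by omega : 64 - i = 0)]
  simp

theorem pvPositionsFrom_step (v i : Nat) (h : i < 64) :
    pvPositionsFrom v i =
      if v.testBit i then i :: pvPositionsFrom v (i + 1) else pvPositionsFrom v (i + 1) := by
  unfold pvPositionsFrom
  rw [(by omega : 64 - i = (64 - (i + 1)) + 1), List.range'_succ, List.filter_cons]

theorem pvPositionsFrom_mem_ge (v i p : Nat) (h : p ∈ pvPositionsFrom v i) : i ≤ p := by
  unfold pvPositionsFrom at h
  have := (List.mem_filter.mp h).1
  have := List.mem_range'_1.mp this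
  omega

theorem pvStepRun_append (l : List Nat) : ∀ (init rest : List (Nat × Nat)), init ≠ [] →
    l.foldl pvStepRun (init ++ rest) = l.foldl pvStepRun init ++ rest := by
  induction l with
  | nil => intro init rest _; rfl
  | cons p l ihl =>
    intro init rest hne
    match init with
    | (s, e) :: init' =>
      rw [List.cons_append, List.foldl_cons, List.foldl_cons]
      by_cases h : e + 1 = p
      · simp only [pvStepRun]
        rw [if_pos h, if_pos h]
        exact ihl ((s, p) :: init') rest (by simp)
      · simp only [pvStepRun]
        rw [if_neg h, if_neg h]
        exact ihl ((p, p) :: (s, e) :: init') rest (by simp)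

def pvRunsB (l : List Nat) : List (Nat × Nat) := (l.foldl pvStepRun []).reverse

theorem pvFoldFrom (v : Nat) : ∀ n i s rest, 64 - i ≤ n → i < 64 → v.testBit i = true →
    ((pvPositionsFrom v (i + 1)).foldl pvStepRun ((s, i) :: rest)).reverse
      = rest.reverse ++ (s, pvScanEnd v (i + 1) - 1) ::
          pvRunsB (pvPositionsFrom v (pvScanEnd v (i + 1))) := by
  intro n
  induction n with
  | zero => intro i s rest hn h64 _; omega
  | succ n ih =>
    intro i s rest _ h64 hb
    by_cases h1 : i + 1 < 64
    · by_cases hb1 : v.testBit (i + 1)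
      · -- run continues at i+1
        rw [pvPositionsFrom_step v (i + 1) h1, if_pos hb1, List.foldl_cons]
        have hstep : pvStepRun ((s, i) :: rest) (i + 1) = (s, i + 1) :: rest := by
          simp [pvStepRun]
        rw [hstep, ih (i + 1) s rest (by omega) h1 hb1,
          pvScanEnd_succ v (i + 1) ⟨h1, hb1⟩]
      · -- run ends at i
        have hstop : pvScanEnd v (i + 1) = i + 1 := pvScanEnd_stop v (i + 1) (by tauto)
        rw [hstop, (by omega : i + 1 - 1 = i)]
        rw [pvPositionsFrom_step v (i + 1) h1, if_neg hb1]
        rcases hl : pvPositionsFrom v (i + 2) with _ | ⟨p, l'⟩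
        · simp [pvRunsB]
        · have hp : i + 2 ≤ p := pvPositionsFrom_mem_ge v (i + 2) p (by rw [hl]; simp)
          rw [List.foldl_cons]
          have hstep : pvStepRun ((s, i) :: rest) p = (p, p) :: (s, i) :: rest := by
            simp only [pvStepRun]; rw [if_neg (by omega)]
          rw [hstep]
          have hA : List.foldl pvStepRun ((p, p) :: (s, i) :: rest) l'
              = List.foldl pvStepRun [(p, p)] l' ++ ((s, i) :: rest) :=
            pvStepRun_append l' [(p, p)] ((s, i) :: rest) (by simp)
          rw [hA]
          have hrB : pvRunsB (p :: l') = (l'.foldl pvStepRun [(p, p)]).reverse := by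
            simp [pvRunsB, pvStepRun]
          simp [hrB]
    · -- i+1 is past the loop bound
      have hstop : pvScanEnd v (i + 1) = i + 1 := pvScanEnd_stop v (i + 1) (by omega)
      rw [hstop, (by omega : i + 1 - 1 = i)]
      rw [pvPositionsFrom_stop v (i + 1) (by omega)]
      simp [pvRunsB]

theorem pvRunsB_eq (v : Nat) : ∀ n i, 64 - i ≤ n →
    pvRunsB (pvPositionsFrom v i) = pvRunsFrom v i := by
  intro n
  induction n with
  | zero =>
    intro i hi
    rw [pvPositionsFrom_stop v i (by omega), pvRunsFrom, dif_neg (by omega)]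
    rfl
  | succ n ih =>
    intro i hi
    by_cases h64 : i < 64
    · by_cases hb : v.testBit i
      · rw [pvPositionsFrom_step v i h64, if_pos hb]
        rw [pvRunsFrom, dif_pos h64, dif_pos hb]
        have h1 : pvRunsB (i :: pvPositionsFrom v (i + 1))
            = ((pvPositionsFrom v (i + 1)).foldl pvStepRun ((i, i) :: [])).reverse := by
          simp [pvRunsB, pvStepRun]
        rw [h1, pvFoldFrom v (n + 1) i i [] hi h64 hb]
        have hge : i + 1 ≤ pvScanEnd v (i + 1) := pvScanEnd_ge v (i + 1)
        rw [ih (pvScanEnd v (i + 1)) (by omega)]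
        simp
      · rw [pvPositionsFrom_step v i h64, if_neg hb]
        rw [pvRunsFrom, dif_pos h64, dif_neg hb]
        exact ih (i + 1) (by omega)
    · rw [pvPositionsFrom_stop v i (by omega), pvRunsFrom, dif_neg h64]
      rfl

theorem pvPositions_eq (v : Nat) :
    (List.range 64).filter (fun i => v &&& (1 <<< i) != 0) = pvPositionsFrom v 0 := by
  unfold pvPositionsFrom
  rw [List.range_eq_range']
  congr 1
  funext k
  have h1 : (1 : Nat) <<< k = 2 ^ k := by rw [Nat.shiftLeft_eq, one_mul]
  rw [h1]
  rcases h : v.testBit k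
  · simp only [Nat.and_two_pow, h, Bool.toNat_false, zero_mul]
    simp
  · simp only [Nat.and_two_pow, h, Bool.toNat_true, one_mul]
    simp [bne_iff_ne]

-- nonemptiness of a formatted run (first run decides the comma placement)
theorem pvToDigitsCore_len (b : Nat) : ∀ f n l, l.length ≤ (Nat.toDigitsCore b f n l).length := by
  intro f
  induction f with
  | zero => intro n l; simp [Nat.toDigitsCore]
  | succ f ih =>
    intro n l
    rw [Nat.toDigitsCore]
    split
    · simp
    · have := ih (n / b) (Nat.digitChar (n % b) :: l)
      simp at this ⊢
      omega

theorem pvRepr_ne (n : Nat) : (Nat.repr n).toList ≠ [] := by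
  have h1 : 1 ≤ (Nat.toDigits 10 n).length := by
    rw [Nat.toDigits, Nat.toDigitsCore]
    split
    · simp
    · have := pvToDigitsCore_len 10 n (n / 10) [Nat.digitChar (n % 10)]
      simp at this ⊢
      omega
  have h2 : (Nat.repr n).toList = Nat.toDigits 10 n := by
    simp [Nat.repr]
  rw [h2]
  intro h
  rw [h] at h1
  simp at h1

theorem pvFmtRun_ne (r : Nat × Nat) : (pvFmtRun r).toList ≠ [] := by
  unfold pvFmtRun
  split
  · simp
  · split
    · simp
    · exact pvRepr_ne r.1

theorem pvFoldStr_join : ∀ (rs : List (Nat × Nat)) (acc : String), acc.toList ≠ [] →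
    List.foldl pvStepStr acc rs = PySem.Str.join "," (acc :: rs.map pvFmtRun) := by
  intro rs
  induction rs with
  | nil =>
    intro acc hacc
    apply String.toList_inj.mp
    simp [PySem.Str.toList_join, PySem.Chars.join, List.intercalate]
  | cons r rs ih =>
    intro acc hacc
    rw [List.foldl_cons]
    have hne : acc ≠ "" := by
      intro h; rw [h] at hacc; exact hacc rfl
    have hstep : pvStepStr acc r = acc ++ "," ++ pvFmtRun r := by
      rw [pvStepStr, if_pos hne]
    rw [hstep, List.map_cons]
    rw [ih (acc ++ "," ++ pvFmtRun r) (by simp)]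
    apply String.toList_inj.mp
    rcases rs with _ | ⟨r2, rs2⟩ <;>
      simp [PySem.Str.toList_join, PySem.Chars.join, List.intercalate]

theorem pvFoldStr_join_nil (rs : List (Nat × Nat)) :
    List.foldl pvStepStr "" rs = PySem.Str.join "," (rs.map pvFmtRun) := by
  rcases rs with _ | ⟨r, rs'⟩
  · apply String.toList_inj.mp
    simp [PySem.Str.toList_join, PySem.Chars.join, List.intercalate]
  · rw [List.foldl_cons]
    have hstep : pvStepStr "" r = pvFmtRun r := by
      rw [pvStepStr, if_neg (by simp)]
      apply String.toList_inj.mp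
      simp
    rw [hstep, List.map_cons, pvFoldStr_join rs' (pvFmtRun r) (pvFmtRun_ne r)]

theorem pvMain (v : Nat) :
    pvOuterA v 64 "" 0 1 =
      PySem.Str.join ","
        ((((List.range 64).filter (fun i => v &&& (1 <<< i) != 0)).foldl pvStepRun []).reverse.map
          pvFmtRun) := by
  have h1 : pvOuterA v 64 "" 0 1 = pvOuterA v 64 "" 0 (2 ^ 0) := by norm_num
  rw [h1, pvOuterA_eq v 64 0 "" (by omega), pvPositions_eq]
  show List.foldl pvStepStr "" (pvRunsFrom v 0)
    = PySem.Str.join "," ((pvRunsB (pvPositionsFrom v 0)).map pvFmtRun)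
  rw [pvRunsB_eq v 64 0 (by omega)]
  exact pvFoldStr_join_nil (pvRunsFrom v 0)

-- ===== VERDICT (by name: the statement is the Claim_ definition above) =====
theorem convert2cpuset_py_spec : Claim_equal_convert2cpuset_py := by
  intro cpuset _ _
  cases cpuset with
  | none => rfl
  | some s =>
    simp only [Spec_convert2cpuset_py, convert2cpuset_py, convert2cpuset_py_alt]
    by_cases hg : s = "" ∨ ¬ PySem.Str.startswith s "0x"
    · rw [if_pos hg, if_pos hg]
    · rw [if_neg hg, if_neg hg]
      cases h : PySem.Int.ofStrBase? s 16 with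
      | none => rfl
      | some v => simpa using pvMain v.toNat
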